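-- pv_equiv track=rewrite | github.com/tothedarktowercame/futon6 | scripts/verify-p6-dbar-mechanism.py | find_independent_set
-- ===== SOURCE A (Python) =====
-- def find_independent_set(n, edges, taus, eps):
--     adj_heavy = [set() for _ in range(n)]
--     for idx, (u, v) in enumerate(edges):
--         if taus[idx] > eps:
--             adj_heavy[u].add(v)
--             adj_heavy[v].add(u)
--     I_set = set()
--     for v in sorted(range(n), key=lambda vv: len(adj_heavy[vv])):
--         if all(u not in I_set for u in adj_heavy[v]):
--             I_set.add(v)
--     return sorted(I_set)
-- ===== SOURCE B (Python) =====
-- def find_independent_set(n, edges, taus, eps):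
--     # round-based peeling: each round selects every remaining vertex that is a
--     # position-minimum among its remaining heavy neighbours (a vertex never
--     # conflicts with itself), then removes the selections and their
--     # neighbourhoods; repeat until nothing remains
--     adj = [set() for _ in range(n)]
--     for (u, v), tau in zip(edges, taus):
--         if tau > eps:
--             adj[u].add(v)
--             adj[v].add(u)
--     order = sorted(range(n), key=lambda vv: len(adj[vv]))
--     pos = {v: i for i, v in enumerate(order)}
--     alive = set(range(n))
--     result = []
--     while alive:
--         winners = [v for v in order
--                    if v in alive and all(u == v or u not in alive or pos[v] < pos[u]
--                                          for u in adj[v])]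
--         for v in winners:
--             result.append(v)
--             alive.discard(v)
--             alive.difference_update(adj[v])
--     return sorted(result)
-- ===== Notes on version B (the rewrite author's own statement) =====
-- stated objective: alternative
-- what changed: B replaces A's single sequential greedy scan (each vertex checked against the growing chosen set) by round-based peeling: every round simultaneously selects all remaining vertices that are position-minimal among their remaining heavy neighbours, then deletes the selections together with their neighbourhoods and repeats until nothing remains.
-- outside the precondition, e.g. on find_independent_set(2, [(0, -1)], [1], 0): A returns [0], B returns [0, 1]
import Mathlib
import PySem

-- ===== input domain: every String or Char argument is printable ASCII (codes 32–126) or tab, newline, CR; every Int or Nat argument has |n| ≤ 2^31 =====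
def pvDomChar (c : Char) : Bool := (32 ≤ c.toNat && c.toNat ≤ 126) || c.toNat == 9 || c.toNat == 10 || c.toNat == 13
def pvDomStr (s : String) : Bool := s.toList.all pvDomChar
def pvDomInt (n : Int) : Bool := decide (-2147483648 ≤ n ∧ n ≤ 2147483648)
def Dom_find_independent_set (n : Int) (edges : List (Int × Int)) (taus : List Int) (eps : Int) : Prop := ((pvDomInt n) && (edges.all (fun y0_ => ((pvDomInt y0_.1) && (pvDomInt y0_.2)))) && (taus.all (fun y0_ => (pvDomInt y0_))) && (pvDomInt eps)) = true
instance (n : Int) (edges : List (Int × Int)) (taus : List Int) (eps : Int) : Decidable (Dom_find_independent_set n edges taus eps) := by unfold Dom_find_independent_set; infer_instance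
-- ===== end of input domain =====

-- B replaces A's sequential degree-ordered greedy scan by a different algorithm: round-based
-- peeling that each round selects every remaining vertex that is position-minimal among its
-- remaining heavy neighbours, then removes selections and their neighbourhoods (objective:
-- alternative). Equivalence is claimed on Pre_ (heavy endpoints in [0, n), taus long enough).

-- ===== PORT A =====
-- adj_heavy[i] : under Pre_ every heavy index is in [0, adj.length); outside that A raises/wraps,
-- which Pre_ excludes, so the out-of-range branch is a harmless no-op / default here.
def pvAAdjAt (adj : List (PySem.Set Int)) (i : Int) : PySem.Set Int :=
  (PySem.List.pyGet? adj i).getD []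

-- adj_heavy[i].add(x)  (write-back of the mutated set)
def pvAAddAt (adj : List (PySem.Set Int)) (i : Int) (x : Int) : List (PySem.Set Int) :=
  if 0 ≤ i ∧ i < (adj.length : Int) then
    adj.set i.toNat (PySem.Set.add adj[i.toNat]! x)
  else adj

def find_independent_set (n : Int) (edges : List (Int × Int)) (taus : List Int) (eps : Int) : List Int :=
  -- adj_heavy = [set() for _ in range(n)]
  let adj0 : List (PySem.Set Int) := List.replicate n.toNat ([] : PySem.Set Int)
  -- for idx, (u, v) in enumerate(edges): if taus[idx] > eps: add both directions
  -- (taus[idx] out of range raises in Python — excluded by Pre_; the default eps makes the test False)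
  let adj := (PySem.List.enumerate edges).foldl
    (fun adj p =>
      if (PySem.List.pyGet? taus p.1).getD eps > eps then
        pvAAddAt (pvAAddAt adj p.2.1 p.2.2) p.2.2 p.2.1
      else adj) adj0
  -- for v in sorted(range(n), key=lambda vv: len(adj_heavy[vv])): if all(u not in I_set …): I_set.add(v)
  let I := (PySem.List.sorted (PySem.List.pyRange 0 n 1)
              (fun vv => (pvAAdjAt adj vv).length) false).foldl
    (fun I v =>
      if (pvAAdjAt adj v).all (fun u => ! PySem.Set.contains I u) then PySem.Set.add I v
      else I) ([] : PySem.Set Int)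
  PySem.List.sorted I (fun x => x) false

-- ===== PORT B =====
-- pos = {v: i for i, v in enumerate(order)}
def pvPosDict (order : List Int) : PySem.Dict Int Int :=
  (PySem.List.enumerate order).foldl (fun d p => d.insert p.2 p.1) PySem.Dict.empty

-- winners = [v for v in order if v in alive and all(u == v or u not in alive or pos[v] < pos[u] for u in adj[v])]
-- (pos[·] is only reached on keys present under Pre_, so the total getD is exact there)
def pvWinners (adj : List (PySem.Set Int)) (pos : PySem.Dict Int Int)
    (alive : PySem.Set Int) (order : List Int) : List Int :=
  order.filter (fun v => PySem.Set.contains alive v &&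
    (pvAAdjAt adj v).all (fun u => u == v || !(PySem.Set.contains alive u) ||
      decide (pos.getD v 0 < pos.getD u 0)))

-- while alive: … (the fuel only makes the loop total in Lean; on every input admitted by Pre_
-- each round removes at least one vertex, so n+1 rounds always suffice — proved below)
def pvPeel (adj : List (PySem.Set Int)) (pos : PySem.Dict Int Int) (order : List Int) :
    Nat → PySem.Set Int → List Int → List Int
  | 0, _, result => result
  | fuel+1, alive, result =>
    if alive.isEmpty then result
    else
      let st := (pvWinners adj pos alive order).foldl
        (fun st v => (st.1 ++ [v], PySem.Set.diff (PySem.Set.discard st.2 v) (pvAAdjAt adj v)))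
        (result, alive)
      pvPeel adj pos order fuel st.2 st.1

def find_independent_set_alt (n : Int) (edges : List (Int × Int)) (taus : List Int) (eps : Int) : List Int :=
  -- adj = [set() for _ in range(n)]; for (u, v), tau in zip(edges, taus): if tau > eps: add both
  let adj := (edges.zip taus).foldl
    (fun adj q => if q.2 > eps then pvAAddAt (pvAAddAt adj q.1.1 q.1.2) q.1.2 q.1.1 else adj)
    (List.replicate n.toNat ([] : PySem.Set Int))
  -- order = sorted(range(n), key=lambda vv: len(adj[vv]))
  let order := PySem.List.sorted (PySem.List.pyRange 0 n 1)
    (fun vv => (pvAAdjAt adj vv).length) false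
  let pos := pvPosDict order
  -- alive = set(range(n)); result = []; while alive: …
  let alive := PySem.Set.ofList (PySem.List.pyRange 0 n 1)
  PySem.List.sorted (pvPeel adj pos order (n.toNat + 1) alive []) (fun x => x) false

-- ===== PRECONDITION & SPEC =====
-- Pre_ excludes the inputs where A raises IndexError (taus shorter than edges, or a heavy endpoint
-- outside [-n, n)) and heavy endpoints in [-n, 0), where A's negative-index wraparound is an
-- accident of its list representation (B's peeling then keeps vertices A's wrapped entry blocks).
def Pre_find_independent_set (n : Int) (edges : List (Int × Int)) (taus : List Int) (eps : Int) : Prop :=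
  edges.length ≤ taus.length ∧
  ∀ p ∈ edges.zip taus, p.2 > eps → 0 ≤ p.1.1 ∧ p.1.1 < n ∧ 0 ≤ p.1.2 ∧ p.1.2 < n
instance (n : Int) (edges : List (Int × Int)) (taus : List Int) (eps : Int) : Decidable (Pre_find_independent_set n edges taus eps) := by unfold Pre_find_independent_set; infer_instance

def pvWitness_find_independent_set : Int × (List (Int × Int)) × List Int × Int := (3, [(0, 1)], [1], 0)

def Spec_find_independent_set (n : Int) (edges : List (Int × Int)) (taus : List Int) (eps : Int) (out : List Int) : Prop := out = find_independent_set_alt n edges taus eps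
instance (n : Int) (edges : List (Int × Int)) (taus : List Int) (eps : Int) (out : List Int) : Decidable (Spec_find_independent_set n edges taus eps out) := by unfold Spec_find_independent_set; infer_instance

-- ===== CLAIM (what is proved, stated in full; the proofs are below) =====
def Claim_equal_find_independent_set : Prop := ∀ (n : Int) (edges : List (Int × Int)) (taus : List Int) (eps : Int), Dom_find_independent_set n edges taus eps → Pre_find_independent_set n edges taus eps → Spec_find_independent_set n edges taus eps (find_independent_set n edges taus eps)

-- ===== LEMMAS AND PROOFS =====

-- A's 'for idx, (u, v) in enumerate(edges)' with 'taus[idx]' is the fold over zip(edges, taus)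
theorem pv_enum_zip {γ : Type} (g : γ → Int → (Int × Int) → γ) (d : Int) :
    ∀ (es : List (Int × Int)) (pre ts : List Int) (init : γ), es.length ≤ ts.length →
    (PySem.List.enumerate es (pre.length : Int)).foldl
        (fun acc p => g acc ((PySem.List.pyGet? (pre ++ ts) p.1).getD d) p.2) init
      = (es.zip ts).foldl (fun acc q => g acc q.2 q.1) init := by
  intro es
  induction es with
  | nil => intro pre ts init _; simp [PySem.List.enumerate_nil]
  | cons e es ih =>
    intro pre ts init hlen
    cases ts with
    | nil => simp at hlen
    | cons t ts' =>
      rw [PySem.List.enumerate_cons]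
      simp only [List.foldl_cons, List.zip_cons_cons]
      rw [PySem.List.pyGet?_append_length]
      have h1 : ((pre.length : Int) + 1) = (((pre ++ [t]).length : Int)) := by
        simp
      have h2 : pre ++ t :: ts' = (pre ++ [t]) ++ ts' := by simp
      rw [h1, h2, ih (pre ++ [t]) ts' _ (by simpa using Nat.le_of_succ_le_succ (by simpa using hlen))]
      rfl

theorem pv_enum_zip0 {γ : Type} (g : γ → Int → (Int × Int) → γ) (d : Int)
    (es : List (Int × Int)) (ts : List Int) (init : γ) (h : es.length ≤ ts.length) :
    (PySem.List.enumerate es 0).foldl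
        (fun acc p => g acc ((PySem.List.pyGet? ts p.1).getD d) p.2) init
      = (es.zip ts).foldl (fun acc q => g acc q.2 q.1) init := by
  have := pv_enum_zip g d es [] ts init h
  simpa using this

theorem pvAAddAt_length (adj : List (PySem.Set Int)) (u x : Int) :
    (pvAAddAt adj u x).length = adj.length := by
  unfold pvAAddAt; split <;> simp

theorem pvAAdjAt_pvAAddAt (adj : List (PySem.Set Int)) (u x v : Int)
    (hu : 0 ≤ u ∧ u < (adj.length : Int)) (hv : 0 ≤ v ∧ v < (adj.length : Int)) :
    pvAAdjAt (pvAAddAt adj u x) v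
      = if v = u then PySem.Set.add (pvAAdjAt adj u) x else pvAAdjAt adj v := by
  have hu' : u.toNat < adj.length := by omega
  have hv' : v.toNat < adj.length := by omega
  unfold pvAAdjAt pvAAddAt
  rw [if_pos hu]
  rw [show PySem.List.pyGet? (adj.set u.toNat (PySem.Set.add adj[u.toNat]! x)) v
        = (adj.set u.toNat (PySem.Set.add adj[u.toNat]! x))[v.toNat]?
      from PySem.List.pyGet?_of_nonneg _ hv.1,
      show PySem.List.pyGet? adj u = adj[u.toNat]? from PySem.List.pyGet?_of_nonneg _ hu.1,
      show PySem.List.pyGet? adj v = adj[v.toNat]? from PySem.List.pyGet?_of_nonneg _ hv.1]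
  by_cases hvu : v = u
  · subst hvu
    simp [hv']
  · have hne : u.toNat ≠ v.toNat := by omega
    simp [hne, hvu]

-- membership in the adjacency after processing one heavy edge (u, x)
theorem pv_mem_lstep (adj : List (PySem.Set Int)) (u x v w : Int)
    (hu : 0 ≤ u ∧ u < (adj.length : Int)) (hx : 0 ≤ x ∧ x < (adj.length : Int))
    (hv : 0 ≤ v ∧ v < (adj.length : Int)) :
    (w ∈ pvAAdjAt (pvAAddAt (pvAAddAt adj u x) x u) v)
      ↔ (w ∈ pvAAdjAt adj v ∨ (v = u ∧ w = x) ∨ (v = x ∧ w = u)) := by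
  have hx' : 0 ≤ x ∧ x < ((pvAAddAt adj u x).length : Int) := by
    rw [pvAAddAt_length]; exact hx
  have hv' : 0 ≤ v ∧ v < ((pvAAddAt adj u x).length : Int) := by
    rw [pvAAddAt_length]; exact hv
  rw [pvAAdjAt_pvAAddAt _ _ _ _ hx' hv']
  by_cases hvx : v = x
  · subst hvx
    rw [pvAAdjAt_pvAAddAt _ _ _ _ hu hv]
    by_cases hvu : v = u
    · subst hvu
      simp [PySem.Set.mem_add]
    · simp [hvu, PySem.Set.mem_add]
  · rw [pvAAdjAt_pvAAddAt _ _ _ _ hu hv]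
    by_cases hvu : v = u
    · subst hvu
      simp [hvx, PySem.Set.mem_add]
    · simp [hvx, hvu]

-- symmetry + range closure of the built adjacency
theorem pv_build_sym (n eps : Int) :
    ∀ (zs : List ((Int × Int) × Int)) (adj : List (PySem.Set Int)),
    adj.length = n.toNat →
    (∀ q ∈ zs, q.2 > eps → 0 ≤ q.1.1 ∧ q.1.1 < n ∧ 0 ≤ q.1.2 ∧ q.1.2 < n) →
    (∀ v w : Int, 0 ≤ v → v < n → w ∈ pvAAdjAt adj v → (0 ≤ w ∧ w < n) ∧ v ∈ pvAAdjAt adj w) →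
    ∀ v w : Int, 0 ≤ v → v < n →
      w ∈ pvAAdjAt (zs.foldl (fun adj q => if q.2 > eps then pvAAddAt (pvAAddAt adj q.1.1 q.1.2) q.1.2 q.1.1 else adj) adj) v →
      (0 ≤ w ∧ w < n) ∧ v ∈ pvAAdjAt (zs.foldl (fun adj q => if q.2 > eps then pvAAddAt (pvAAddAt adj q.1.1 q.1.2) q.1.2 q.1.1 else adj) adj) w := by
  intro zs
  induction zs with
  | nil => intro adj _ _ h v w hv0 hvn hm; exact h v w hv0 hvn hm
  | cons q zs ih =>
    intro adj hlen hr h v w hv0 hvn hm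
    simp only [List.foldl_cons] at hm ⊢
    by_cases hq : q.2 > eps
    · rw [if_pos hq] at hm ⊢
      obtain ⟨h1, h2, h3, h4⟩ := hr q (by simp) hq
      have hnpos : 0 < n := by omega
      have hcast : (adj.length : Int) = n := by rw [hlen]; omega
      have hL : ((pvAAddAt (pvAAddAt adj q.1.1 q.1.2) q.1.2 q.1.1).length) = n.toNat := by
        rw [pvAAddAt_length, pvAAddAt_length]; exact hlen
      refine ih _ hL (fun q' hq' => hr q' (List.mem_cons_of_mem _ hq')) ?_ v w hv0 hvn hm
      intro a b ha0 han hb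
      have hba : 0 ≤ a ∧ a < (adj.length : Int) := by rw [hcast]; exact ⟨ha0, han⟩
      have hbu : 0 ≤ q.1.1 ∧ q.1.1 < (adj.length : Int) := by rw [hcast]; exact ⟨h1, h2⟩
      have hbx : 0 ≤ q.1.2 ∧ q.1.2 < (adj.length : Int) := by rw [hcast]; exact ⟨h3, h4⟩
      rw [pv_mem_lstep adj _ _ _ _ hbu hbx hba] at hb
      rcases hb with hb | ⟨rfl, rfl⟩ | ⟨rfl, rfl⟩
      · obtain ⟨⟨hb0, hbn⟩, hab⟩ := h a b ha0 han hb
        have hbb : 0 ≤ b ∧ b < (adj.length : Int) := by rw [hcast]; exact ⟨hb0, hbn⟩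
        refine ⟨⟨hb0, hbn⟩, ?_⟩
        rw [pv_mem_lstep adj _ _ _ _ hbu hbx hbb]
        exact Or.inl hab
      · refine ⟨⟨h3, h4⟩, ?_⟩
        rw [pv_mem_lstep adj _ _ _ _ hbu hbx hbx]
        exact Or.inr (Or.inr ⟨rfl, rfl⟩)
      · refine ⟨⟨h1, h2⟩, ?_⟩
        rw [pv_mem_lstep adj _ _ _ _ hbu hbx hbu]
        exact Or.inr (Or.inl ⟨rfl, rfl⟩)
    · rw [if_neg hq] at hm ⊢
      exact ih _ hlen (fun q' hq' => hr q' (List.mem_cons_of_mem _ hq')) h v w hv0 hvn hm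

-- pos dict reads back as the index in order (nodup order)
theorem pv_pos_getD (o : List Int) (hnd : o.Nodup) (v : Int) (hv : v ∈ o) :
    (pvPosDict o).getD v 0 = (o.idxOf v : Int) := by
  have hfix : ∀ (zs : List (Int × Int)) (d : PySem.Dict Int Int) (v : Int),
      (∀ p ∈ zs, p.2 ≠ v) →
      (zs.foldl (fun d p => d.insert p.2 p.1) d).getD v 0 = d.getD v 0 := by
    intro zs
    induction zs with
    | nil => intro d v _; rfl
    | cons p zs ih =>
      intro d v h
      simp only [List.foldl_cons]
      rw [ih _ _ (fun q hq => h q (List.mem_cons_of_mem _ hq)), PySem.Dict.getD_insert,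
        if_neg (fun he => h p (by simp) he.symm)]
  have haux : ∀ (o : List Int) (k : Int) (d : PySem.Dict Int Int), o.Nodup →
      ∀ v ∈ o, ((PySem.List.enumerate o k).foldl (fun d p => d.insert p.2 p.1) d).getD v 0
        = k + (o.idxOf v : Int) := by
    intro o
    induction o with
    | nil => simp
    | cons a tl ih =>
      intro k d hnd v hv
      rw [PySem.List.enumerate_cons]
      simp only [List.foldl_cons]
      rcases List.mem_cons.mp hv with rfl | hvtl
      · have hnotin : v ∉ tl := (List.nodup_cons.mp hnd).1
        rw [hfix _ _ _ ?_]
        · rw [PySem.Dict.getD_insert, if_pos rfl, List.idxOf_cons_self]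
          simp
        · intro p hp hpv
          apply hnotin
          have : p.2 ∈ (PySem.List.enumerate tl (k + 1)).map (·.2) := List.mem_map_of_mem hp
          rw [PySem.List.map_snd_enumerate] at this
          rwa [hpv] at this
      · have hne : a ≠ v := by rintro rfl; exact (List.nodup_cons.mp hnd).1 hvtl
        rw [ih (k + 1) _ (List.nodup_cons.mp hnd).2 v hvtl, List.idxOf_cons_ne _ hne]
        push_cast
        ring
  have := haux o 0 PySem.Dict.empty hnd v hv
  unfold pvPosDict
  rw [this]
  ring

-- greedy loop: monotone, members come from the order list, keeps Nodup
theorem pv_greedy_mono (adjF : List (PySem.Set Int)) :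
    ∀ (l : List Int) (I : PySem.Set Int) (x : Int), x ∈ I →
    x ∈ l.foldl (fun I v => if (pvAAdjAt adjF v).all (fun u => ! PySem.Set.contains I u) then PySem.Set.add I v else I) I := by
  intro l
  induction l with
  | nil => intro I x hx; exact hx
  | cons v l ih =>
    intro I x hx
    simp only [List.foldl_cons]
    apply ih
    split
    · rw [PySem.Set.mem_add]; exact Or.inl hx
    · exact hx

theorem pv_greedy_range (adjF : List (PySem.Set Int)) :
    ∀ (l : List Int) (I : PySem.Set Int) (x : Int),
    x ∈ l.foldl (fun I v => if (pvAAdjAt adjF v).all (fun u => ! PySem.Set.contains I u) then PySem.Set.add I v else I) I →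
    x ∈ I ∨ x ∈ l := by
  intro l
  induction l with
  | nil => intro I x hx; exact Or.inl hx
  | cons v l ih =>
    intro I x hx
    simp only [List.foldl_cons] at hx
    rcases ih _ _ hx with hx | hx
    · split at hx
      · rw [PySem.Set.mem_add] at hx
        rcases hx with hx | rfl
        · exact Or.inl hx
        · exact Or.inr (by simp)
      · exact Or.inl hx
    · exact Or.inr (List.mem_cons_of_mem _ hx)

theorem pv_greedy_nodup (adjF : List (PySem.Set Int)) :
    ∀ (l : List Int) (I : PySem.Set Int), I.Nodup →
    (l.foldl (fun I v => if (pvAAdjAt adjF v).all (fun u => ! PySem.Set.contains I u) then PySem.Set.add I v else I) I).Nodup := by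
  intro l
  induction l with
  | nil => intro I h; exact h
  | cons v l ih =>
    intro I h
    simp only [List.foldl_cons]
    apply ih
    split
    · exact PySem.Set.nodup_add _ _ h
    · exact h

-- the greedy result is independent: two chosen vertices are never heavy neighbours
theorem pv_greedy_indep (n : Int) (adjF : List (PySem.Set Int))
    (hsym : ∀ v w : Int, 0 ≤ v → v < n → w ∈ pvAAdjAt adjF v → (0 ≤ w ∧ w < n) ∧ v ∈ pvAAdjAt adjF w) :
    ∀ (l : List Int) (I : PySem.Set Int),
    (∀ v ∈ l, 0 ≤ v ∧ v < n) → (∀ v ∈ I, 0 ≤ v ∧ v < n) →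
    (∀ u v : Int, u ∈ I → v ∈ I → u ∈ pvAAdjAt adjF v → u = v) →
    ∀ u v : Int,
      u ∈ l.foldl (fun I v => if (pvAAdjAt adjF v).all (fun u => ! PySem.Set.contains I u) then PySem.Set.add I v else I) I →
      v ∈ l.foldl (fun I v => if (pvAAdjAt adjF v).all (fun u => ! PySem.Set.contains I u) then PySem.Set.add I v else I) I →
      u ∈ pvAAdjAt adjF v → u = v := by
  intro l
  induction l with
  | nil => intro I _ _ hpair u v hu hv huv; exact hpair u v hu hv huv
  | cons w l ih =>
    intro I hl hI hpair u v hu hv huv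
    simp only [List.foldl_cons] at hu hv
    have hwr := hl w (by simp)
    refine ih _ (fun a ha => hl a (List.mem_cons_of_mem _ ha)) ?_ ?_ u v hu hv huv
    · intro a ha
      split at ha
      · rw [PySem.Set.mem_add] at ha
        rcases ha with ha | rfl
        · exact hI a ha
        · exact hwr
      · exact hI a ha
    · intro a b ha hb hab
      by_cases hchk : ((pvAAdjAt adjF w).all (fun u => ! PySem.Set.contains I u)) = true
      · rw [if_pos hchk, PySem.Set.mem_add] at ha hb
        simp only [List.all_eq_true, Bool.not_eq_true'] at hchk
        rcases ha with ha | rfl <;> rcases hb with hb | rfl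
        · exact hpair a b ha hb hab
        · -- a ∈ I, b = w, a ∈ adj w: check at w says a ∉ I
          have := hchk a hab
          simp only [PySem.Set.contains_eq_listContains] at this
          exact absurd ha (by simpa using this)
        · -- a = w, b ∈ I, w ∈ adj b: symmetry gives b ∈ adj w, then check contradicts b ∈ I
          obtain ⟨hbI1, hbI2⟩ := hI b hb
          obtain ⟨_, hba⟩ := hsym b a hbI1 hbI2 hab
          have := hchk b hba
          simp only [PySem.Set.contains_eq_listContains] at this
          exact absurd hb (by simpa using this)
        · rfl
      · rw [if_neg hchk] at ha hb
        exact hpair a b ha hb hab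


-- index arithmetic on a nodup decomposition
theorem pv_idx_append_cons (v : Int) (s t : List Int) (h : v ∉ s) :
    (s ++ v :: t).idxOf v = s.length := by
  induction s with
  | nil => simp
  | cons a s ih =>
    have hav : a ≠ v := by rintro rfl; exact h (by simp)
    simp only [List.cons_append, List.idxOf_cons_ne _ hav, List.length_cons]
    rw [ih (fun hm => h (by simp [hm]))]

theorem pv_nodup_length_le (l1 l2 : List Int) (h1 : l1.Nodup) (hs : l1 ⊆ l2) :
    l1.length ≤ l2.length := by
  calc l1.length = l1.toFinset.card := (List.toFinset_card_of_nodup h1).symm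
    _ ≤ l2.toFinset.card := Finset.card_le_card (fun x hx => by
        simp only [List.mem_toFinset] at *; exact hs hx)
    _ ≤ l2.length := l2.toFinset_card_le

-- one greedy step never removes elements
theorem pv_step_mono (adjF : List (PySem.Set Int)) (I : PySem.Set Int) (v x : Int) (hx : x ∈ I) :
    x ∈ (if (pvAAdjAt adjF v).all (fun u => ! PySem.Set.contains I u) then PySem.Set.add I v else I) := by
  split
  · rw [PySem.Set.mem_add]; exact Or.inl hx
  · exact hx

-- decoding membership in the winners filter
theorem pv_mem_winners (adjF : List (PySem.Set Int)) (pos : PySem.Dict Int Int)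
    (alive : PySem.Set Int) (o : List Int) (v : Int) :
    v ∈ pvWinners adjF pos alive o ↔
      v ∈ o ∧ v ∈ alive ∧ ∀ u ∈ pvAAdjAt adjF v,
        u = v ∨ u ∉ alive ∨ pos.getD v 0 < pos.getD u 0 := by
  unfold pvWinners
  rw [List.mem_filter]
  simp only [Bool.and_eq_true, List.all_eq_true, Bool.or_eq_true, beq_iff_eq,
    decide_eq_true_eq]
  constructor
  · rintro ⟨h1, h2, h3⟩
    refine ⟨h1, by simpa using h2, fun u hu => ?_⟩
    rcases h3 u hu with (h | h) | h
    · exact Or.inl h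
    · exact Or.inr (Or.inl (by simpa using h))
    · exact Or.inr (Or.inr h)
  · rintro ⟨h1, h2, h3⟩
    refine ⟨h1, by simpa using h2, fun u hu => ?_⟩
    rcases h3 u hu with h | h | h
    · exact Or.inl (Or.inl h)
    · exact Or.inl (Or.inr (by simpa using h))
    · exact Or.inr h

-- completeness: a vertex all of whose earlier heavy neighbours are rejected is chosen
theorem pv_greedy_complete (adjF : List (PySem.Set Int)) (o : List Int) (hnd : o.Nodup)
    (v : Int) (hv : v ∈ o)
    (H : ∀ u ∈ pvAAdjAt adjF v,
        u ∈ o.foldl (fun I v => if (pvAAdjAt adjF v).all (fun u => ! PySem.Set.contains I u) then PySem.Set.add I v else I) ([] : PySem.Set Int) →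
        ¬ (o.idxOf u < o.idxOf v)) :
    v ∈ o.foldl (fun I v => if (pvAAdjAt adjF v).all (fun u => ! PySem.Set.contains I u) then PySem.Set.add I v else I) ([] : PySem.Set Int) := by
  obtain ⟨s, t, rfl⟩ := List.append_of_mem hv
  have hvs : v ∉ s := by
    have := hnd
    rw [List.nodup_append] at this
    exact fun hm => this.2.2 v hm v (by simp) rfl
  rw [List.foldl_append, List.foldl_cons] at H ⊢
  set Id := s.foldl (fun I v => if (pvAAdjAt adjF v).all (fun u => ! PySem.Set.contains I u) then PySem.Set.add I v else I) ([] : PySem.Set Int) with hId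
  have hchk : ((pvAAdjAt adjF v).all (fun u => ! PySem.Set.contains Id u)) = true := by
    rw [List.all_eq_true]
    intro u hu
    rw [Bool.not_eq_true', ← Bool.not_eq_true, PySem.Set.contains_iff]
    intro huId
    have hus : u ∈ s := by
      rcases pv_greedy_range adjF s [] u huId with h | h
      · simp at h
      · exact h
    have huS : u ∈ t.foldl (fun I v => if (pvAAdjAt adjF v).all (fun u => ! PySem.Set.contains I u) then PySem.Set.add I v else I)
        ((if (pvAAdjAt adjF v).all (fun u => ! PySem.Set.contains Id u) then PySem.Set.add Id v else Id)) :=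
      pv_greedy_mono adjF t _ u (pv_step_mono adjF Id v u huId)
    refine H u hu huS ?_
    rw [pv_idx_append_cons v s t hvs, List.idxOf_append_of_mem hus]
    exact List.idxOf_lt_length_of_mem hus
  rw [hchk]
  simp only [if_true]
  exact pv_greedy_mono adjF t _ v (by rw [PySem.Set.mem_add]; exact Or.inr rfl)

-- the first alive element of o minimises idxOf among alive
theorem pv_exists_min (o alive : List Int) (h : ∃ x ∈ o, x ∈ alive) :
    ∃ v ∈ o, v ∈ alive ∧ ∀ u ∈ o, u ∈ alive → o.idxOf v ≤ o.idxOf u := by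
  induction o with
  | nil => simp at h
  | cons a tl ih =>
    by_cases ha : a ∈ alive
    · exact ⟨a, by simp, ha, fun u _ _ => by simp [List.idxOf_cons_self]⟩
    · obtain ⟨x, hx, hxa⟩ := h
      have hxtl : x ∈ tl := by
        rcases List.mem_cons.mp hx with rfl | h'
        · exact absurd hxa ha
        · exact h'
      obtain ⟨v, hv, hva, hmin⟩ := ih ⟨x, hxtl, hxa⟩
      have hav : a ≠ v := by rintro rfl; exact ha hva
      refine ⟨v, List.mem_cons_of_mem _ hv, hva, fun u hu hua => ?_⟩
      have hau : a ≠ u := by rintro rfl; exact ha hua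
      have hutl : u ∈ tl := by
        rcases List.mem_cons.mp hu with rfl | h'
        · exact absurd rfl hau
        · exact h'
      rw [List.idxOf_cons_ne _ hav, List.idxOf_cons_ne _ hau]
      exact Nat.succ_le_succ (hmin u hutl hua)

-- one peeling round: closed form of the inner fold
theorem pv_round_fst (adjF : List (PySem.Set Int)) :
    ∀ (W result : List Int) (alive : PySem.Set Int),
    (W.foldl (fun st v => (st.1 ++ [v], PySem.Set.diff (PySem.Set.discard st.2 v) (pvAAdjAt adjF v))) (result, alive)).1 = result ++ W := by
  intro W
  induction W with
  | nil => intro result alive; simp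
  | cons v W ih =>
    intro result alive
    simp only [List.foldl_cons]
    rw [ih]
    simp

theorem pv_round_snd (adjF : List (PySem.Set Int)) :
    ∀ (W result : List Int) (alive : PySem.Set Int) (x : Int),
    x ∈ (W.foldl (fun st v => (st.1 ++ [v], PySem.Set.diff (PySem.Set.discard st.2 v) (pvAAdjAt adjF v))) (result, alive)).2
      ↔ x ∈ alive ∧ x ∉ W ∧ ∀ v ∈ W, x ∉ pvAAdjAt adjF v := by
  intro W
  induction W with
  | nil => intro result alive x; simp
  | cons v W ih =>
    intro result alive x
    simp only [List.foldl_cons]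
    rw [ih]
    rw [PySem.Set.mem_diff, PySem.Set.mem_discard]
    constructor
    · rintro ⟨⟨⟨hx, hxv⟩, hxadj⟩, hW, hadj⟩
      refine ⟨hx, ?_, ?_⟩
      · simp only [List.mem_cons]
        rintro (rfl | h)
        · exact hxv rfl
        · exact hW h
      · intro w hw
        rcases List.mem_cons.mp hw with rfl | h
        · exact hxadj
        · exact hadj w h
    · rintro ⟨hx, hW, hadj⟩
      refine ⟨⟨⟨hx, fun he => hW (by simp [he])⟩, hadj v (by simp)⟩,
        fun h => hW (List.mem_cons_of_mem _ h), fun w hw => hadj w (List.mem_cons_of_mem _ hw)⟩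

theorem pv_round_nodup (adjF : List (PySem.Set Int)) :
    ∀ (W result : List Int) (alive : PySem.Set Int), alive.Nodup →
    (W.foldl (fun st v => (st.1 ++ [v], PySem.Set.diff (PySem.Set.discard st.2 v) (pvAAdjAt adjF v))) (result, alive)).2.Nodup := by
  intro W
  induction W with
  | nil => intro result alive h; exact h
  | cons v W ih =>
    intro result alive h
    simp only [List.foldl_cons]
    exact ih _ _ (PySem.Set.nodup_diff _ _ (PySem.Set.nodup_discard _ _ h))

-- the peeling loop returns exactly the greedy set (as a Nodup list)
theorem pv_peel_main (n : Int) (adjF : List (PySem.Set Int)) (o : List Int)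
    (pos : PySem.Dict Int Int)
    (hnd : o.Nodup)
    (ho : ∀ v : Int, v ∈ o ↔ 0 ≤ v ∧ v < n)
    (hpos : ∀ v ∈ o, pos.getD v 0 = (o.idxOf v : Int))
    (hsym : ∀ v w : Int, 0 ≤ v → v < n → w ∈ pvAAdjAt adjF v → (0 ≤ w ∧ w < n) ∧ v ∈ pvAAdjAt adjF w) :
    ∀ (fuel : Nat) (alive result : List Int),
    alive.length ≤ fuel →
    alive.Nodup →
    (∀ v ∈ alive, v ∈ o) →
    result.Nodup →
    (∀ v ∈ result, v ∈ o.foldl (fun I v => if (pvAAdjAt adjF v).all (fun u => ! PySem.Set.contains I u) then PySem.Set.add I v else I) ([] : PySem.Set Int)) →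
    (∀ v : Int, v ∈ o.foldl (fun I v => if (pvAAdjAt adjF v).all (fun u => ! PySem.Set.contains I u) then PySem.Set.add I v else I) ([] : PySem.Set Int) → v ∉ alive → v ∈ result) →
    (∀ v ∈ alive, v ∉ result) →
    (∀ u ∈ result, ∀ w ∈ pvAAdjAt adjF u, w ∉ alive) →
    (pvPeel adjF pos o fuel alive result).Nodup ∧
      ∀ x : Int, x ∈ pvPeel adjF pos o fuel alive result ↔
        x ∈ o.foldl (fun I v => if (pvAAdjAt adjF v).all (fun u => ! PySem.Set.contains I u) then PySem.Set.add I v else I) ([] : PySem.Set Int) := by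
  have hS_sub : ∀ x : Int,
      x ∈ o.foldl (fun I v => if (pvAAdjAt adjF v).all (fun u => ! PySem.Set.contains I u) then PySem.Set.add I v else I) ([] : PySem.Set Int) → x ∈ o := by
    intro x hx
    rcases pv_greedy_range adjF o [] x hx with h | h
    · simp at h
    · exact h
  have hg3 : ∀ u v : Int,
      u ∈ o.foldl (fun I v => if (pvAAdjAt adjF v).all (fun u => ! PySem.Set.contains I u) then PySem.Set.add I v else I) ([] : PySem.Set Int) →
      v ∈ o.foldl (fun I v => if (pvAAdjAt adjF v).all (fun u => ! PySem.Set.contains I u) then PySem.Set.add I v else I) ([] : PySem.Set Int) →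
      u ∈ pvAAdjAt adjF v → u = v := by
    apply pv_greedy_indep n adjF hsym o []
    · intro v hv; exact (ho v).mp hv
    · intro v hv; simp at hv
    · intro u v hu; simp at hu
  have hidx_inj : ∀ u v : Int, u ∈ o → v ∈ o → o.idxOf u = o.idxOf v → u = v := by
    intro u v hu hv he
    have h2 : o[o.idxOf u]'(List.idxOf_lt_length_of_mem hu) = u := List.getElem_idxOf _
    have h3 : o[o.idxOf v]'(List.idxOf_lt_length_of_mem hv) = v := List.getElem_idxOf _
    rw [← h2, ← h3]
    simp [he]
  intro fuel
  induction fuel with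
  | zero =>
    intro alive result hlen hand hao hrnd hrS hSr har hnbr
    have hae : alive = [] := List.eq_nil_of_length_eq_zero (Nat.le_zero.mp hlen)
    subst hae
    exact ⟨hrnd, fun x => ⟨fun hx => hrS x hx, fun hx => hSr x hx (by simp)⟩⟩
  | succ fuel ih =>
    intro alive result hlen hand hao hrnd hrS hSr har hnbr
    by_cases hae : alive = []
    · subst hae
      have hred : pvPeel adjF pos o (fuel + 1) [] result = result := by
        simp [pvPeel]
      rw [hred]
      exact ⟨hrnd, fun x => ⟨fun hx => hrS x hx, fun hx => hSr x hx (by simp)⟩⟩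
    · have hred : pvPeel adjF pos o (fuel + 1) alive result
          = pvPeel adjF pos o fuel
              ((pvWinners adjF pos alive o).foldl
                (fun st v => (st.1 ++ [v], PySem.Set.diff (PySem.Set.discard st.2 v) (pvAAdjAt adjF v)))
                (result, alive)).2
              ((pvWinners adjF pos alive o).foldl
                (fun st v => (st.1 ++ [v], PySem.Set.diff (PySem.Set.discard st.2 v) (pvAAdjAt adjF v)))
                (result, alive)).1 := by
        simp only [pvPeel]
        rw [if_neg (by simp [hae])]
      rw [hred]
      -- the round's winners
      set W := pvWinners adjF pos alive o with hWdef
      -- every winner is greedy-chosen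
      have hWS : ∀ v ∈ W,
          v ∈ o.foldl (fun I v => if (pvAAdjAt adjF v).all (fun u => ! PySem.Set.contains I u) then PySem.Set.add I v else I) ([] : PySem.Set Int) := by
        intro v hv
        rw [hWdef, pv_mem_winners] at hv
        obtain ⟨hvo, hval, hcond⟩ := hv
        apply pv_greedy_complete adjF o hnd v hvo
        intro u hu huS hlt
        have huo : u ∈ o := hS_sub u huS
        rcases hcond u hu with rfl | hunal | hposlt
        · exact absurd hlt (lt_irrefl _)
        · have hures : u ∈ result := hSr u huS hunal
          obtain ⟨hvb, hvadj⟩ := hsym v u ((ho v).mp hvo).1 ((ho v).mp hvo).2 hu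
          exact hnbr u hures v hvadj hval
        · rw [hpos u huo, hpos v hvo] at hposlt
          omega
      -- W is nonempty, so the round makes progress
      obtain ⟨x0, hx0⟩ := List.exists_mem_of_ne_nil alive hae
      obtain ⟨vm, hvmo, hvmal, hvmmin⟩ := pv_exists_min o alive ⟨x0, hao x0 hx0, hx0⟩
      have hvmW : vm ∈ W := by
        rw [hWdef, pv_mem_winners]
        refine ⟨hvmo, hvmal, fun u hu => ?_⟩
        by_cases huv : u = vm
        · exact Or.inl huv
        by_cases hual : u ∈ alive
        · refine Or.inr (Or.inr ?_)
          have huo : u ∈ o := hao u hual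
          have hle := hvmmin u huo hual
          have hne : o.idxOf vm ≠ o.idxOf u := fun he => huv (hidx_inj u vm huo hvmo he.symm)
          rw [hpos u huo, hpos vm hvmo]
          omega
        · exact Or.inr (Or.inl hual)
      -- closed form of the round
      have hfst := pv_round_fst adjF W result alive
      have hsnd := fun x => pv_round_snd adjF W result alive x
      have hand' := pv_round_nodup adjF W result alive hand
      have hWnodup : W.Nodup := by rw [hWdef]; exact hnd.filter _
      have hWal : ∀ v ∈ W, v ∈ alive := by
        intro v hv; rw [hWdef, pv_mem_winners] at hv; exact hv.2.1
      rw [hfst]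
      -- fuel bound
      have hlen' : ((W.foldl
            (fun st v => (st.1 ++ [v], PySem.Set.diff (PySem.Set.discard st.2 v) (pvAAdjAt adjF v)))
            (result, alive)).2).length ≤ fuel := by
        have hsub : (W.foldl
            (fun st v => (st.1 ++ [v], PySem.Set.diff (PySem.Set.discard st.2 v) (pvAAdjAt adjF v)))
            (result, alive)).2 ⊆ alive.erase vm := by
          intro x hx
          rw [hsnd x] at hx
          exact (List.mem_erase_of_ne (fun he => hx.2.1 (by rw [he]; exact hvmW))).mpr hx.1
        have h1 := pv_nodup_length_le _ _ hand' hsub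
        rw [List.length_erase_of_mem hvmal] at h1
        have h2 : 1 ≤ alive.length := List.length_pos_of_mem hvmal
        omega
      refine ih _ _ hlen' hand' ?_ ?_ ?_ ?_ ?_ ?_
      · intro v hv
        rw [hsnd v] at hv
        exact hao v hv.1
      · rw [List.nodup_append]
        refine ⟨hrnd, hWnodup, fun a ha b hb => ?_⟩
        rintro rfl
        exact har a (hWal a hb) ha
      · intro v hv
        rcases List.mem_append.mp hv with hv | hv
        · exact hrS v hv
        · exact hWS v hv
      · intro v hvS hvnal'
        by_cases hval : v ∈ alive
        · rw [hsnd v] at hvnal'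
          push Not at hvnal'
          by_cases hvW : v ∈ W
          · exact List.mem_append.mpr (Or.inr hvW)
          · obtain ⟨w, hwW, hvadj⟩ := hvnal' hval hvW
            have : v = w := hg3 v w hvS (hWS w hwW) hvadj
            exact List.mem_append.mpr (Or.inr (this ▸ hwW))
        · exact List.mem_append.mpr (Or.inl (hSr v hvS hval))
      · intro v hv
        rw [hsnd v] at hv
        intro hmem
        rcases List.mem_append.mp hmem with h | h
        · exact har v hv.1 h
        · exact hv.2.1 h
      · intro u hu w hw
        rw [hsnd w]
        rcases List.mem_append.mp hu with hu | hu
        · intro hx; exact hnbr u hu w hw hx.1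
        · intro hx; exact hx.2.2 u hu hw

-- ===== VERDICT =====
theorem find_independent_set_spec : Claim_equal_find_independent_set := by
  intro n edges taus eps _ hpre
  obtain ⟨hlen, hrange⟩ := hpre
  unfold Spec_find_independent_set
  simp only [find_independent_set, find_independent_set_alt]
  have hadjA : (PySem.List.enumerate edges).foldl
      (fun adj p => if (PySem.List.pyGet? taus p.1).getD eps > eps then pvAAddAt (pvAAddAt adj p.2.1 p.2.2) p.2.2 p.2.1 else adj)
      (List.replicate n.toNat ([] : PySem.Set Int))
      = (edges.zip taus).foldl
      (fun adj q => if q.2 > eps then pvAAddAt (pvAAddAt adj q.1.1 q.1.2) q.1.2 q.1.1 else adj)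
      (List.replicate n.toNat ([] : PySem.Set Int)) :=
    pv_enum_zip0 (fun acc t q => if t > eps then pvAAddAt (pvAAddAt acc q.1 q.2) q.2 q.1 else acc)
      eps edges taus _ hlen
  rw [hadjA]
  set adjF := (edges.zip taus).foldl
      (fun adj q => if q.2 > eps then pvAAddAt (pvAAddAt adj q.1.1 q.1.2) q.1.2 q.1.1 else adj)
      (List.replicate n.toNat ([] : PySem.Set Int)) with hadjF
  set o := PySem.List.sorted (PySem.List.pyRange 0 n 1)
      (fun vv => (pvAAdjAt adjF vv).length) false with hodef
  have hoNodup : o.Nodup :=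
    ((PySem.List.sorted_perm _ _ _).nodup_iff).mpr (PySem.List.nodup_pyRange_one _ _)
  have ho : ∀ v : Int, v ∈ o ↔ 0 ≤ v ∧ v < n := by
    intro v
    rw [hodef, PySem.List.mem_sorted, PySem.List.mem_pyRange_one]
  have hinit : ∀ v w : Int, 0 ≤ v → v < n →
      w ∈ pvAAdjAt (List.replicate n.toNat ([] : PySem.Set Int)) v →
      (0 ≤ w ∧ w < n) ∧ v ∈ pvAAdjAt (List.replicate n.toNat ([] : PySem.Set Int)) w := by
    intro v w hv0 hvn hm
    have hv' : v.toNat < n.toNat := by omega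
    unfold pvAAdjAt at hm
    rw [PySem.List.pyGet?_of_nonneg _ hv0] at hm
    simp [hv'] at hm
  have hsym : ∀ v w : Int, 0 ≤ v → v < n →
      w ∈ pvAAdjAt adjF v → (0 ≤ w ∧ w < n) ∧ v ∈ pvAAdjAt adjF w := by
    intro v w hv0 hvn hm
    exact pv_build_sym n eps (edges.zip taus) _ (by simp) hrange hinit v w hv0 hvn hm
  have hmain := pv_peel_main n adjF o (pvPosDict o) hoNodup ho
      (fun v hv => pv_pos_getD o hoNodup v hv) hsym (n.toNat + 1)
      (PySem.List.pyRange 0 n 1) []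
      (by rw [PySem.List.length_pyRange_one]; omega)
      (PySem.List.nodup_pyRange_one _ _)
      (by intro v hv; rw [ho v]; rwa [PySem.List.mem_pyRange_one] at hv)
      List.nodup_nil
      (by intro v hv; simp at hv)
      (by
        intro v hvS hvnal
        exfalso
        apply hvnal
        rw [PySem.List.mem_pyRange_one]
        have hvo : v ∈ o := by
          rcases pv_greedy_range adjF o [] v hvS with h | h
          · simp at h
          · exact h
        exact (ho v).mp hvo)
      (by intro v hv; simp)
      (by intro u hu; simp at hu)
  obtain ⟨hLnodup, hLmem⟩ := hmain
  have hSnodup : (o.foldl (fun I v => if (pvAAdjAt adjF v).all (fun u => ! PySem.Set.contains I u) then PySem.Set.add I v else I) ([] : PySem.Set Int)).Nodup :=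
    pv_greedy_nodup adjF o [] List.nodup_nil
  have hperm : (o.foldl (fun I v => if (pvAAdjAt adjF v).all (fun u => ! PySem.Set.contains I u) then PySem.Set.add I v else I) ([] : PySem.Set Int)).Perm
      (pvPeel adjF (pvPosDict o) o (n.toNat + 1) (PySem.List.pyRange 0 n 1) []) :=
    (List.perm_ext_iff_of_nodup hSnodup hLnodup).mpr (fun a => (hLmem a).symm)
  -- alive starts as set(range(n)) = range(n) itself
  have halive : PySem.Set.ofList (PySem.List.pyRange 0 n 1) = PySem.List.pyRange 0 n 1 :=
    PySem.Set.ofList_eq_self_of_nodup _ (PySem.List.nodup_pyRange_one _ _)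
  rw [halive]
  exact PySem.List.sorted_eq_sorted_of_perm _ _ (fun x => x) (fun a b h => h) hperm
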